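-- pv_equiv track=rewrite | github.com/nagybalint/advent-of-code-2020 | day_7/task1.py | find_container_for
-- ===== SOURCE A (Python) =====
-- from typing import Dict, List, Tuple
--
-- def find_container_for(bags: Dict[str, Dict[str, int]], color: str) -> List[str]:
--     containers = set()
--     containers.add(color)
--     for k, v in bags.items():
--         if color in v.keys():
--             containers.add(k)
--             new_containers = find_container_for(bags, k)
--             containers = containers.union(new_containers)
--     return containers
-- ===== SOURCE B (Python) =====
-- def find_container_for(bags, color):
--     # Iterative depth-first search of the reverse containment relation using an
--     # explicit stack and a visited set: each bag is expanded at most once,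
--     # instead of A's fresh recursive re-computation of every bag's closure.
--     visited = set()
--     stack = [color]
--     while stack:
--         c = stack.pop()
--         if c in visited:
--             continue
--         visited.add(c)
--         for k in reversed(list(bags)):
--             if c in bags[k]:
--                 stack.append(k)
--     return visited
-- ===== Notes on version B (the rewrite author's own statement) =====
-- stated objective: alternative
-- what changed: A recomputes the full transitive-container closure of every bag it meets by a fresh recursion per encounter with no shared state; B is an iterative, non-recursive worklist DFS over the reverse containment relation: an explicit stack plus one shared visited set, so each bag is expanded at most once.
import Mathlib
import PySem

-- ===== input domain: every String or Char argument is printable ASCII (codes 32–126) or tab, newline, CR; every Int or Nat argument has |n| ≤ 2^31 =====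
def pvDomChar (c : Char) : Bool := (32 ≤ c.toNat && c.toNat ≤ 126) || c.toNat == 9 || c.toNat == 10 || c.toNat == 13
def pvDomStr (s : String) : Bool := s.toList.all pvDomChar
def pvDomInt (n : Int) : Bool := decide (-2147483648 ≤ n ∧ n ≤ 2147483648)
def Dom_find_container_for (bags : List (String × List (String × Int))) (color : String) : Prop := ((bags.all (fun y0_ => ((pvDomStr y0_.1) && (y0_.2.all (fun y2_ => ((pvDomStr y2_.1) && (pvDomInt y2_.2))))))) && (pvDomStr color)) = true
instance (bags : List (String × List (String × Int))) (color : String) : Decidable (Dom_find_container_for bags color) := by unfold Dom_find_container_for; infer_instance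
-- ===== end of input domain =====

-- B replaces A's per-encounter recursive re-computation of every bag's container closure by an
-- iterative explicit-stack depth-first search with one shared visited set (each bag expanded once).
-- A's Python returns a set; both ports return its distinct elements as a list.

-- ===== PORT A =====
-- 'color in v.keys()'
def pvMemKeys (v : List (String × Int)) (c : String) : Bool := v.any (fun q => q.1 == c)

-- A's recursion is not structurally decreasing, so the port carries fuel; under
-- Pre_ (acyclic containment graph) chains have at most bags.length edges, so the
-- fuel bags.length + 1 used below is never exhausted (proved in the lemmas).
def pvFindA (bags : List (String × List (String × Int))) : Nat → String → PySem.Set String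
  | 0, color => PySem.Set.add PySem.Set.empty color
  | n+1, color =>
    bags.foldl (fun containers kv =>
      if pvMemKeys kv.2 color then
        PySem.Set.union (PySem.Set.add containers kv.1) (pvFindA bags n kv.1)
      else containers)
      (PySem.Set.add PySem.Set.empty color)

def find_container_for (bags : List (String × List (String × Int))) (color : String) : List String :=
  pvFindA bags (bags.length + 1) color

-- ===== PORT B =====
-- the keys k (in bags order) with 'c in bags[k]' — the bags B's loop pushes when it visits c
def pvSuccs (bags : List (String × List (String × Int))) (c : String) : List String :=
  (bags.filter (fun kv => pvMemKeys kv.2 c)).map (fun kv => kv.1)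

-- B's while-loop. The Python stack's top (its list END) is this list's HEAD, so Python's
-- 'append the matching keys in reversed bag order' is exactly 'pvSuccs bags c ++ stack'.
-- Fuel n is spent only on a visit (the Python loop needs none); bags.length + 2 visits are
-- never exhausted, since only color and keys of bags ever enter the stack (proved below).
def pvLoop (bags : List (String × List (String × Int))) : Nat → List String → PySem.Set String → PySem.Set String
  | _, [], visited => visited
  | 0, _ :: _, visited => visited
  | n+1, c :: stack, visited =>
    if PySem.Set.contains visited c then pvLoop bags (n+1) stack visited
    else pvLoop bags n (pvSuccs bags c ++ stack) (PySem.Set.add visited c)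
  termination_by n stack _ => (n, stack.length)

def find_container_for_alt (bags : List (String × List (String × Int))) (color : String) : List String :=
  pvLoop bags (bags.length + 2) [color] PySem.Set.empty

-- ===== PRECONDITION & SPEC =====
def pvGrow (bags : List (String × List (String × Int))) (s : List String) : List String :=
  PySem.Set.update s (s.flatMap (pvSuccs bags))

def pvIter (bags : List (String × List (String × Int))) : Nat → List String → List String
  | 0, s => s
  | n+1, s => pvIter bags n (pvGrow bags s)

-- all bags transitively containing c (reached in ≥ 1 step)
def pvReach (bags : List (String × List (String × Int))) (c : String) : List String :=
  pvIter bags (bags.length + 1) (PySem.Set.ofList (pvSuccs bags c))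

-- Pre_ excludes exactly the inputs on which A raises RecursionError: those where some bag
-- reachable upward from the query (or the query itself) lies on a containment cycle.
def Pre_find_container_for (bags : List (String × List (String × Int))) (color : String) : Prop :=
  ∀ x ∈ (color :: pvReach bags color), x ∉ pvReach bags x

instance (bags : List (String × List (String × Int))) (color : String) : Decidable (Pre_find_container_for bags color) := by
  unfold Pre_find_container_for; infer_instance

def pvWitness_find_container_for : (List (String × List (String × Int))) × String :=
  ([("b", [("a", 1)]), ("c", [("b", 1)])], "a")

def Spec_find_container_for (bags : List (String × List (String × Int))) (color : String) (out : List String) : Prop := out = find_container_for_alt bags color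
instance (bags : List (String × List (String × Int))) (color : String) (out : List String) : Decidable (Spec_find_container_for bags color out) := by unfold Spec_find_container_for; infer_instance

-- ===== CLAIM (what is proved, stated in full; the proofs are below) =====
def Claim_equal_find_container_for : Prop := ∀ (bags : List (String × List (String × Int))) (color : String), Dom_find_container_for bags color → Pre_find_container_for bags color → Spec_find_container_for bags color (find_container_for bags color)

-- ===== LEMMAS AND PROOFS =====

-- x is directly contained in y (the bag y lists x among its contents)
def pvEdge (bags : List (String × List (String × Int))) (x y : String) : Prop := y ∈ pvSuccs bags x

-- bound on the length of containment chains starting at c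
def pvBnd (bags : List (String × List (String × Int))) (n : Nat) (c : String) : Prop :=
  ∀ l, List.IsChain (pvEdge bags) (c :: l) → l.length < n

theorem pvBnd_zero (bags : List (String × List (String × Int))) (c : String) : ¬ pvBnd bags 0 c := by
  intro h; exact absurd (h [] (List.IsChain.singleton c)) (by simp)

theorem pvBnd_step (bags : List (String × List (String × Int))) {n : Nat} {c k : String}
    (h : pvBnd bags (n+1) c) (e : pvEdge bags c k) : pvBnd bags n k := by
  intro l hl
  have := h (k :: l) (List.IsChain.cons_cons e hl)
  simpa using this

theorem pvEdge_mem_keys {bags : List (String × List (String × Int))} {x y : String}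
    (h : pvEdge bags x y) : y ∈ bags.map (fun kv => kv.1) := by
  unfold pvEdge pvSuccs at h
  simp only [List.mem_map, List.mem_filter] at h ⊢
  obtain ⟨kv, ⟨hm, _⟩, he⟩ := h
  exact ⟨kv, hm, he⟩

theorem pvEdge_of_entry {bags : List (String × List (String × Int))} {kv : String × List (String × Int)} {c : String}
    (hm : kv ∈ bags) (hk : pvMemKeys kv.2 c = true) : pvEdge bags c kv.1 := by
  unfold pvEdge pvSuccs
  simp only [List.mem_map, List.mem_filter]
  exact ⟨kv, ⟨hm, hk⟩, rfl⟩

-- === Set algebra (union = update) ===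
theorem pvUnion_eq_update {s t : List String} : PySem.Set.union s t = PySem.Set.update s t := rfl

theorem pvAdd_eq_update {s : List String} {x : String} : PySem.Set.add s x = PySem.Set.update s [x] := rfl

theorem pvAdd_empty (x : String) : PySem.Set.add PySem.Set.empty x = [x] := rfl

theorem pvUpdate_add (a b : List String) (x : String) :
    PySem.Set.update a (PySem.Set.add b x) = PySem.Set.add (PySem.Set.update a b) x := by
  by_cases hx : x ∈ b
  · rw [PySem.Set.add_of_mem hx, PySem.Set.add_of_mem (by
      rw [PySem.Set.mem_update]; exact Or.inr hx)]
  · rw [PySem.Set.add_of_not_mem hx, PySem.Set.update_append, ← pvAdd_eq_update]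

theorem pvUpdate_assoc (a b t : List String) :
    PySem.Set.update (PySem.Set.update a b) t = PySem.Set.update a (PySem.Set.update b t) := by
  induction t generalizing b with
  | nil => rw [PySem.Set.update_nil, PySem.Set.update_nil]
  | cons x t ih => rw [PySem.Set.update_cons, PySem.Set.update_cons, ← pvUpdate_add, ih]

theorem pvUpdate_of_subset {s t : List String} (h : ∀ x ∈ t, x ∈ s) : PySem.Set.update s t = s := by
  induction t generalizing s with
  | nil => exact PySem.Set.update_nil s
  | cons x t ih =>
    rw [PySem.Set.update_cons, PySem.Set.add_of_mem (h x (List.mem_cons_self))]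
    exact ih (fun y hy => h y (List.mem_cons_of_mem x hy))

-- === facts about pvFindA ===
theorem pvFoldA_extends (bags bs : List (String × List (String × Int))) (n : Nat) (c : String) :
    ∀ S : List String, ∃ e, bs.foldl (fun containers kv =>
      if pvMemKeys kv.2 c then
        PySem.Set.union (PySem.Set.add containers kv.1) (pvFindA bags n kv.1)
      else containers) S = S ++ e := by
  induction bs with
  | nil => exact fun S => ⟨[], by simp⟩
  | cons kv bs ih =>
    intro S
    simp only [List.foldl_cons]
    by_cases hk : pvMemKeys kv.2 c
    · simp only [hk, if_true]
      obtain ⟨e2, h2⟩ := ih (PySem.Set.union (PySem.Set.add S kv.1) (pvFindA bags n kv.1))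
      obtain ⟨a1, ha1⟩ : ∃ a1, PySem.Set.update S [kv.1] = S ++ a1 :=
        ⟨_, PySem.Set.update_eq_append_filter _ _⟩
      obtain ⟨a2, ha2⟩ : ∃ a2, PySem.Set.union (PySem.Set.add S kv.1) (pvFindA bags n kv.1) =
          (S ++ a1) ++ a2 := by
        rw [pvUnion_eq_update, pvAdd_eq_update, PySem.Set.update_eq_append_filter, ha1]
        exact ⟨_, rfl⟩
      rw [h2, ha2, List.append_assoc, List.append_assoc]
      exact ⟨_, rfl⟩
    · simp only [hk, Bool.false_eq_true, if_false]
      exact ih S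

theorem pvFindA_head (bags : List (String × List (String × Int))) (n : Nat) (c : String) :
    ∃ t, pvFindA bags n c = c :: t := by
  cases n with
  | zero => exact ⟨[], rfl⟩
  | succ n =>
    obtain ⟨e, he⟩ := pvFoldA_extends bags bags n c (PySem.Set.add PySem.Set.empty c)
    exact ⟨e, by rw [pvFindA, he, pvAdd_empty]; rfl⟩

theorem pvFindA_self (bags : List (String × List (String × Int))) (n : Nat) (c : String) :
    c ∈ pvFindA bags n c := by
  obtain ⟨t, ht⟩ := pvFindA_head bags n c
  simp [ht]

theorem pvFindA_nodup (bags : List (String × List (String × Int))) : ∀ (n : Nat) (c : String),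
    (pvFindA bags n c).Nodup := by
  intro n c
  induction n generalizing c with
  | zero => simp [pvFindA]
  | succ n ih =>
    rw [pvFindA]
    have H : ∀ (bs : List (String × List (String × Int))) (S : List String), S.Nodup →
        (bs.foldl (fun containers kv =>
          if pvMemKeys kv.2 c then
            PySem.Set.union (PySem.Set.add containers kv.1) (pvFindA bags n kv.1)
          else containers) S).Nodup := by
      intro bs
      induction bs with
      | nil => intro S hS; exact hS
      | cons kv bs ihb =>
        intro S hS
        simp only [List.foldl_cons]
        by_cases hk : pvMemKeys kv.2 c
        · simp only [hk, if_true]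
          exact ihb _ (by
            rw [pvUnion_eq_update, pvAdd_eq_update]
            exact PySem.Set.nodup_update _ _ (PySem.Set.nodup_update _ _ hS))
        · simp only [hk, Bool.false_eq_true, if_false]; exact ihb S hS
    exact H bags _ (by rw [pvAdd_empty]; simp)

theorem pvFindA_mem_fold (bags bs : List (String × List (String × Int))) (n : Nat) (c y : String) :
    ∀ S : List String, (y ∈ bs.foldl (fun containers kv =>
      if pvMemKeys kv.2 c then
        PySem.Set.union (PySem.Set.add containers kv.1) (pvFindA bags n kv.1)
      else containers) S ↔
    y ∈ S ∨ ∃ kv ∈ bs, pvMemKeys kv.2 c = true ∧ (y = kv.1 ∨ y ∈ pvFindA bags n kv.1)) := by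
  induction bs with
  | nil => simp
  | cons kv bs ih =>
    intro S
    simp only [List.foldl_cons]
    by_cases hk : pvMemKeys kv.2 c
    · simp only [hk, if_true]
      rw [ih, pvUnion_eq_update, pvAdd_eq_update, PySem.Set.mem_update, PySem.Set.mem_update]
      simp only [List.mem_cons, List.not_mem_nil, or_false]
      constructor
      · rintro (((h | h) | h) | ⟨kv', hkv', hmk', hy⟩)
        · exact Or.inl h
        · exact Or.inr ⟨kv, Or.inl rfl, hk, Or.inl h⟩
        · exact Or.inr ⟨kv, Or.inl rfl, hk, Or.inr h⟩
        · exact Or.inr ⟨kv', Or.inr hkv', hmk', hy⟩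
      · rintro (h | ⟨kv', hkv' | hkv', hmk', hy | hy⟩)
        · exact Or.inl (Or.inl (Or.inl h))
        · subst hkv'; exact Or.inl (Or.inl (Or.inr hy))
        · subst hkv'; exact Or.inl (Or.inr hy)
        · exact Or.inr ⟨kv', hkv', hmk', Or.inl hy⟩
        · exact Or.inr ⟨kv', hkv', hmk', Or.inr hy⟩
    · simp only [hk, Bool.false_eq_true, if_false]
      rw [ih]
      constructor
      · rintro (h | ⟨kv', hkv', hmk', hy⟩)
        · exact Or.inl h
        · exact Or.inr ⟨kv', List.mem_cons_of_mem kv hkv', hmk', hy⟩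
      · rintro (h | ⟨kv', hkv', hmk', hy⟩)
        · exact Or.inl h
        · rcases List.mem_cons.mp hkv' with h' | h'
          · subst h'; exact absurd hmk' hk
          · exact Or.inr ⟨kv', h', hmk', hy⟩

theorem pvSuccs_mem {bags : List (String × List (String × Int))} {c z : String} :
    z ∈ pvSuccs bags c ↔ ∃ kv ∈ bags, pvMemKeys kv.2 c = true ∧ kv.1 = z := by
  unfold pvSuccs
  simp only [List.mem_map, List.mem_filter]
  constructor
  · rintro ⟨kv, ⟨h1, h2⟩, h3⟩; exact ⟨kv, h1, h2, h3⟩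
  · rintro ⟨kv, h1, h2, h3⟩; exact ⟨kv, ⟨h1, h2⟩, h3⟩

theorem pvFindA_mem (bags : List (String × List (String × Int))) (n : Nat) (c y : String) :
    y ∈ pvFindA bags (n+1) c ↔
    y = c ∨ ∃ kv ∈ bags, pvMemKeys kv.2 c = true ∧ (y = kv.1 ∨ y ∈ pvFindA bags n kv.1) := by
  rw [pvFindA, pvFindA_mem_fold, pvAdd_empty, List.mem_singleton]

theorem pvFindA_closed (bags : List (String × List (String × Int))) :
    ∀ n c, pvBnd bags n c → ∀ y ∈ pvFindA bags n c, ∀ z, pvEdge bags y z → z ∈ pvFindA bags n c := by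
  intro n
  induction n with
  | zero => intro c h; exact absurd h (pvBnd_zero bags c)
  | succ n ih =>
    intro c hBnd y hy z hz
    rw [pvFindA_mem] at hy ⊢
    rcases hy with rfl | ⟨kv, hkv, hmk, hcase⟩
    · -- y = c, z a direct container of c
      obtain ⟨kv, h1, h2, h3⟩ := pvSuccs_mem.mp hz
      exact Or.inr ⟨kv, h1, h2, Or.inl h3.symm⟩
    · have he : pvEdge bags c kv.1 := pvEdge_of_entry hkv hmk
      have hb : pvBnd bags n kv.1 := pvBnd_step bags hBnd he
      rcases hcase with heq | hy'
      · exact Or.inr ⟨kv, hkv, hmk, Or.inr (ih kv.1 hb kv.1 (pvFindA_self bags n kv.1) z (heq ▸ hz))⟩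
      · exact Or.inr ⟨kv, hkv, hmk, Or.inr (ih kv.1 hb y hy' z hz)⟩

theorem pvFindA_subset (bags : List (String × List (String × Int)))
    (c : String) (W : List String)
    (HW : ∀ x ∈ W, (∀ z, pvEdge bags x z → z ∈ W) ∨ Relation.ReflTransGen (pvEdge bags) x c) :
    ∀ n x, x ∈ W → ¬ Relation.ReflTransGen (pvEdge bags) x c → ∀ y ∈ pvFindA bags n x, y ∈ W := by
  intro n
  induction n with
  | zero =>
    intro x hx _ y hy
    rw [pvFindA, pvAdd_empty, List.mem_singleton] at hy
    exact hy ▸ hx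
  | succ n ih =>
    intro x hx hnr y hy
    rw [pvFindA_mem] at hy
    rcases hy with rfl | ⟨kv, hkv, hmk, hcase⟩
    · exact hx
    · have he : pvEdge bags x kv.1 := pvEdge_of_entry hkv hmk
      have hclosed : ∀ z, pvEdge bags x z → z ∈ W := by
        rcases HW x hx with h | h
        · exact h
        · exact absurd h hnr
      have hk1 : kv.1 ∈ W := hclosed kv.1 he
      have hnr1 : ¬ Relation.ReflTransGen (pvEdge bags) kv.1 c :=
        fun h => hnr (Relation.ReflTransGen.head he h)
      rcases hcase with rfl | hy'
      · exact hk1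
      · exact ih kv.1 hk1 hnr1 y hy'

-- === equation lemmas for pvLoop ===
theorem pvLoop_nil (bags : List (String × List (String × Int))) (f : Nat) (vis : PySem.Set String) :
    pvLoop bags f [] vis = vis := by
  cases f <;> rw [pvLoop]

theorem pvLoop_cons_mem (bags : List (String × List (String × Int))) {n : Nat} {c : String}
    {stack : List String} {vis : PySem.Set String} (h : PySem.Set.contains vis c = true) :
    pvLoop bags (n+1) (c :: stack) vis = pvLoop bags (n+1) stack vis := by
  rw [pvLoop, if_pos h]

theorem pvLoop_cons_new (bags : List (String × List (String × Int))) {n : Nat} {c : String}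
    {stack : List String} {vis : PySem.Set String} (h : PySem.Set.contains vis c = false) :
    pvLoop bags (n+1) (c :: stack) vis = pvLoop bags n (pvSuccs bags c ++ stack) (PySem.Set.add vis c) := by
  rw [pvLoop, if_neg (by rw [h]; exact Bool.false_ne_true)]

-- === fuel accounting: the number of still-unvisited candidate nodes ===
def pvCnt (bags : List (String × List (String × Int))) (r : String) (vis : List String) : Nat :=
  ((r :: bags.map (fun kv => kv.1)).filter (fun x => decide (x ∉ vis))).length

theorem pvContains_iff {vis : List String} {x : String} :
    PySem.Set.contains vis x = true ↔ x ∈ vis := by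
  rw [PySem.Set.contains_eq_listContains]
  simp

theorem pvFilter_le {α : Type} (l : List α) (p q : α → Bool) (himp : ∀ x ∈ l, p x = true → q x = true) :
    (l.filter p).length ≤ (l.filter q).length := by
  induction l with
  | nil => simp
  | cons a l ih =>
    have ih' := ih (fun x hx => himp x (List.mem_cons_of_mem a hx))
    by_cases hp : p a = true
    · rw [List.filter_cons_of_pos hp, List.filter_cons_of_pos (himp a List.mem_cons_self hp)]
      simpa using ih'
    · rw [List.filter_cons_of_neg (by simpa using hp)]
      by_cases hq : q a = true
      · rw [List.filter_cons_of_pos hq]; simp; omega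
      · rw [List.filter_cons_of_neg (by simpa using hq)]; exact ih'

theorem pvFilter_lt {α : Type} (l : List α) (p q : α → Bool) (himp : ∀ x ∈ l, p x = true → q x = true)
    (c : α) (hc : c ∈ l) (hq : q c = true) (hp : p c = false) :
    (l.filter p).length < (l.filter q).length := by
  induction l with
  | nil => simp at hc
  | cons a l ih =>
    have hle := pvFilter_le l p q (fun x hx => himp x (List.mem_cons_of_mem a hx))
    rcases List.mem_cons.mp hc with rfl | hc'
    · rw [List.filter_cons_of_neg (by simp [hp]), List.filter_cons_of_pos hq]
      simp; omega
    · have ih' := ih (fun x hx => himp x (List.mem_cons_of_mem a hx)) hc'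
      by_cases hpa : p a = true
      · rw [List.filter_cons_of_pos hpa, List.filter_cons_of_pos (himp a List.mem_cons_self hpa)]
        simpa using ih'
      · rw [List.filter_cons_of_neg (by simpa using hpa)]
        by_cases hqa : q a = true
        · rw [List.filter_cons_of_pos hqa]; simp; omega
        · rw [List.filter_cons_of_neg (by simpa using hqa)]; exact ih'

theorem pvCnt_le (bags : List (String × List (String × Int))) (r : String) (vis : List String) :
    pvCnt bags r vis ≤ bags.length + 1 := by
  unfold pvCnt
  have := List.length_filter_le (fun x => decide (x ∉ vis)) (r :: bags.map (fun kv => kv.1))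
  simpa using this

theorem pvCnt_mono (bags : List (String × List (String × Int))) (r : String) {vis vis' : List String}
    (h : ∀ x ∈ vis, x ∈ vis') : pvCnt bags r vis' ≤ pvCnt bags r vis := by
  apply pvFilter_le
  intro x _ hx
  simp only [decide_eq_true_eq] at hx ⊢
  exact fun hm => hx (h x hm)

theorem pvCnt_lt (bags : List (String × List (String × Int))) (r : String) {vis : List String} {c : String}
    (hc : c ∈ r :: bags.map (fun kv => kv.1)) (hnc : c ∉ vis) :
    pvCnt bags r (PySem.Set.add vis c) < pvCnt bags r vis := by
  refine pvFilter_lt _ _ _ ?_ c hc ?_ ?_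
  · intro x _ hx
    simp only [decide_eq_true_eq] at hx ⊢
    intro hm
    apply hx
    rw [PySem.Set.add_of_not_mem hnc]
    exact List.mem_append.mpr (Or.inl hm)
  · simp [hnc]
  · have hca : c ∈ PySem.Set.add vis c := by
      rw [PySem.Set.add_of_not_mem hnc]
      simp
    simp [hca]

theorem pvSuccs_keys (bags : List (String × List (String × Int))) (c : String) :
    ∀ x ∈ pvSuccs bags c, x ∈ bags.map (fun kv => kv.1) := by
  intro x hx
  exact pvEdge_mem_keys (hx : pvEdge bags c x)

theorem pvReach_key {bags : List (String × List (String × Int))} {r c : String}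
    (h : Relation.ReflTransGen (pvEdge bags) r c) : c ∈ r :: bags.map (fun kv => kv.1) := by
  induction h with
  | refl => exact List.mem_cons_self
  | tail _ e _ => exact List.mem_cons_of_mem _ (pvEdge_mem_keys e)

-- === fuel irrelevance: any fuel above 1 + pvCnt gives the same run ===
theorem pvIRR (bags : List (String × List (String × Int))) (r : String) :
    ∀ (k : Nat) (stack : List String) (vis : PySem.Set String) (f g : Nat),
      pvCnt bags r vis ≤ k →
      (∀ x ∈ stack, x ∈ r :: bags.map (fun kv => kv.1)) →
      1 + pvCnt bags r vis ≤ f → 1 + pvCnt bags r vis ≤ g →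
      pvLoop bags f stack vis = pvLoop bags g stack vis := by
  intro k
  induction k using Nat.strong_induction_on with
  | _ k ih =>
    intro stack
    induction stack with
    | nil => intro vis f g _ _ _ _; rw [pvLoop_nil, pvLoop_nil]
    | cons c stack ihs =>
      intro vis f g hk hU hf hg
      obtain ⟨f₀, rfl⟩ : ∃ f₀, f = f₀+1 := ⟨f-1, by omega⟩
      obtain ⟨g₀, rfl⟩ : ∃ g₀, g = g₀+1 := ⟨g-1, by omega⟩
      cases hc : PySem.Set.contains vis c with
      | false =>
        rw [pvLoop_cons_new bags hc, pvLoop_cons_new bags hc]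
        have hcU : c ∈ r :: bags.map (fun kv => kv.1) := hU c List.mem_cons_self
        have hm : c ∉ vis := by simpa using hc
        have hlt := pvCnt_lt bags r hcU hm
        refine ih (pvCnt bags r (PySem.Set.add vis c)) (by omega) _ _ f₀ g₀ le_rfl ?_ (by omega) (by omega)
        intro x hx
        rcases List.mem_append.mp hx with h | h
        · exact List.mem_cons_of_mem _ (pvSuccs_keys bags c x h)
        · exact hU x (List.mem_cons_of_mem _ h)
      | true =>
        rw [pvLoop_cons_mem bags hc, pvLoop_cons_mem bags hc]
        exact ihs vis (f₀+1) (g₀+1) hk (fun x hx => hU x (List.mem_cons_of_mem _ hx)) hf hg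

-- === MAIN: popping c and finishing its DFS subtree = updating with A's closure of c ===
theorem pvMainStack (bags : List (String × List (String × Int))) (r : String)
    (hacyc : ∀ x, Relation.ReflTransGen (pvEdge bags) r x → ¬ Relation.TransGen (pvEdge bags) x x) :
    ∀ n, ∀ (c : String) (vis : PySem.Set String) (stack : List String) (f f' : Nat),
      Relation.ReflTransGen (pvEdge bags) r c →
      pvBnd bags n c →
      c ∉ vis →
      (∀ x ∈ vis, (∀ z, pvEdge bags x z → z ∈ vis) ∨ Relation.ReflTransGen (pvEdge bags) x c) →
      (∀ x ∈ stack, x ∈ r :: bags.map (fun kv => kv.1)) →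
      1 + pvCnt bags r vis ≤ f →
      1 + pvCnt bags r (PySem.Set.update vis (pvFindA bags n c)) ≤ f' →
      pvLoop bags f (c :: stack) vis = pvLoop bags f' stack (PySem.Set.update vis (pvFindA bags n c)) := by
  intro n
  induction n with
  | zero => intro c vis stack f f' _ h; exact absurd h (pvBnd_zero bags c)
  | succ n ih =>
    intro c vis stack f f' hrc hBnd hc Hvis hstk hf hf'
    obtain ⟨f₀, rfl⟩ : ∃ f₀, f = f₀+1 := ⟨f-1, by omega⟩
    have hcB : PySem.Set.contains vis c = false := by
      cases h : PySem.Set.contains vis c with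
      | false => rfl
      | true => exact absurd (pvContains_iff.mp h) hc
    rw [pvLoop_cons_new bags hcB, pvFindA]
    have hcU : c ∈ r :: bags.map (fun kv => kv.1) := pvReach_key hrc
    have hcnt := pvCnt_lt bags r hcU hc
    have FOLD : ∀ bs : List (String × List (String × Int)), (∀ p ∈ bs, p ∈ bags) →
        ∀ (S W : List String) (f g : Nat), W = PySem.Set.update vis S →
        (∀ x ∈ W, (∀ z, pvEdge bags x z → z ∈ W) ∨ Relation.ReflTransGen (pvEdge bags) x c) →
        1 + pvCnt bags r W ≤ f →
        1 + pvCnt bags r (PySem.Set.update vis (bs.foldl (fun containers kv =>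
          if pvMemKeys kv.2 c then
            PySem.Set.union (PySem.Set.add containers kv.1) (pvFindA bags n kv.1)
          else containers) S)) ≤ g →
        pvLoop bags f (((bs.filter (fun kv => pvMemKeys kv.2 c)).map (fun kv => kv.1)) ++ stack) W
          = pvLoop bags g stack (PySem.Set.update vis (bs.foldl (fun containers kv =>
              if pvMemKeys kv.2 c then
                PySem.Set.union (PySem.Set.add containers kv.1) (pvFindA bags n kv.1)
              else containers) S)) := by
      intro bs
      induction bs with
      | nil =>
        intro _ S W f g hWS HW hfW hg
        simp only [List.filter_nil, List.map_nil, List.nil_append, List.foldl_nil]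
        simp only [List.foldl_nil] at hg
        rw [← hWS]
        rw [← hWS] at hg
        exact pvIRR bags r (pvCnt bags r W) stack W f g le_rfl hstk hfW hg
      | cons kv bs ihb =>
        intro hsub S W f g hWS HW hfW hg
        have hkvb : kv ∈ bags := hsub kv List.mem_cons_self
        simp only [List.foldl_cons] at hg ⊢
        simp only [List.filter_cons]
        by_cases hk : pvMemKeys kv.2 c
        · simp only [hk, if_true, List.map_cons] at hg ⊢
          have he : pvEdge bags c kv.1 := pvEdge_of_entry hkvb hk
          have hb : pvBnd bags n kv.1 := pvBnd_step bags hBnd he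
          have hSA : PySem.Set.update vis
              (PySem.Set.union (PySem.Set.add S kv.1) (pvFindA bags n kv.1)) =
              PySem.Set.update (PySem.Set.update W [kv.1]) (pvFindA bags n kv.1) := by
            rw [pvUnion_eq_update, pvAdd_eq_update, ← pvUpdate_assoc, ← pvUpdate_assoc, ← hWS]
          by_cases hmem : kv.1 ∈ W
          · -- B skips this key; A's union adds nothing new to W
            obtain ⟨f₁, rfl⟩ : ∃ f₁, f = f₁+1 := ⟨f-1, by omega⟩
            rw [List.cons_append, pvLoop_cons_mem bags (pvContains_iff.mpr hmem)]
            have hnr1 : ¬ Relation.ReflTransGen (pvEdge bags) kv.1 c := by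
              intro h
              exact hacyc c hrc (Relation.TransGen.head' he h)
            have hsubW : ∀ y ∈ pvFindA bags n kv.1, y ∈ W :=
              pvFindA_subset bags c W HW n kv.1 hmem hnr1
            have hstate : PySem.Set.update vis
                (PySem.Set.union (PySem.Set.add S kv.1) (pvFindA bags n kv.1)) = W := by
              rw [hSA, ← pvAdd_eq_update, PySem.Set.add_of_mem hmem, pvUpdate_of_subset hsubW]
            exact ihb (fun p hp => hsub p (List.mem_cons_of_mem kv hp)) _ W (f₁+1) g
              hstate.symm HW hfW hg
          · -- B visits this key: the outer IH finishes its whole DFS subtree first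
            rw [List.cons_append]
            have hkeys : ∀ x ∈ ((bs.filter (fun kv => pvMemKeys kv.2 c)).map (fun kv => kv.1)) ++ stack,
                x ∈ r :: bags.map (fun kv => kv.1) := by
              intro x hx
              rcases List.mem_append.mp hx with h | h
              · obtain ⟨kv', hkv', hrfl⟩ := List.mem_map.mp h
                subst hrfl
                exact List.mem_cons_of_mem _ (List.mem_map.mpr
                  ⟨kv', hsub kv' (List.mem_cons_of_mem kv (List.mem_filter.mp hkv').1), rfl⟩)
              · exact hstk x h
            have hfW' : 1 + pvCnt bags r (PySem.Set.update W (pvFindA bags n kv.1)) ≤ f := by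
              have := pvCnt_mono bags r (vis := W) (vis' := PySem.Set.update W (pvFindA bags n kv.1))
                (fun x hx => by rw [PySem.Set.mem_update]; exact Or.inl hx)
              omega
            have hrec := ih kv.1 W (((bs.filter (fun kv => pvMemKeys kv.2 c)).map (fun kv => kv.1)) ++ stack) f f
              (hrc.tail he) hb hmem
              (fun x hxW => (HW x hxW).imp id (fun h => Relation.ReflTransGen.tail h he))
              hkeys hfW hfW'
            rw [hrec]
            have hstate : PySem.Set.update vis
                (PySem.Set.union (PySem.Set.add S kv.1) (pvFindA bags n kv.1)) =
                PySem.Set.update W (pvFindA bags n kv.1) := by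
              rw [hSA]
              obtain ⟨t, ht⟩ := pvFindA_head bags n kv.1
              rw [ht, ← pvAdd_eq_update, PySem.Set.add_of_not_mem hmem,
                  PySem.Set.update_cons, PySem.Set.update_cons,
                  PySem.Set.add_of_mem (by simp : kv.1 ∈ W ++ [kv.1]),
                  PySem.Set.add_of_not_mem hmem]
            have HW' : ∀ x ∈ PySem.Set.update W (pvFindA bags n kv.1),
                (∀ z, pvEdge bags x z → z ∈ PySem.Set.update W (pvFindA bags n kv.1)) ∨
                Relation.ReflTransGen (pvEdge bags) x c := by
              intro x hxW'
              rw [PySem.Set.mem_update] at hxW'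
              rcases hxW' with hxW | hxF
              · rcases HW x hxW with h | h
                · exact Or.inl (fun z hz => by rw [PySem.Set.mem_update]; exact Or.inl (h z hz))
                · exact Or.inr h
              · refine Or.inl (fun z hz => ?_)
                rw [PySem.Set.mem_update]
                exact Or.inr (pvFindA_closed bags n kv.1 hb x hxF z hz)
            exact ihb (fun p hp => hsub p (List.mem_cons_of_mem kv hp)) _ _ f g
              hstate.symm HW' hfW' hg
        · simp only [hk, Bool.false_eq_true, if_false] at hg ⊢
          exact ihb (fun p hp => hsub p (List.mem_cons_of_mem kv hp)) S W f g hWS HW hfW hg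
    rw [pvFindA] at hf'
    have HW0 : ∀ x ∈ PySem.Set.add vis c, (∀ z, pvEdge bags x z → z ∈ PySem.Set.add vis c) ∨
        Relation.ReflTransGen (pvEdge bags) x c := by
      intro x hx
      rw [PySem.Set.add_of_not_mem hc] at hx
      rcases List.mem_append.mp hx with hx | hx
      · rcases Hvis x hx with h | h
        · exact Or.inl (fun z hz => by
            rw [PySem.Set.add_of_not_mem hc]
            exact List.mem_append.mpr (Or.inl (h z hz)))
        · exact Or.inr h
      · rw [List.mem_singleton] at hx
        subst hx
        exact Or.inr Relation.ReflTransGen.refl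
    exact FOLD bags (fun p hp => hp) (PySem.Set.add PySem.Set.empty c) (PySem.Set.add vis c) f₀ f'
      (by rw [pvAdd_empty, ← pvAdd_eq_update]) HW0 (by omega) hf'

-- === Pre_ ⇒ acyclicity, and chain bound ===
theorem pvChain_transGen (bags : List (String × List (String × Int))) :
    ∀ l (a : String), List.IsChain (pvEdge bags) (a :: l) → ∀ y ∈ l, Relation.TransGen (pvEdge bags) a y := by
  intro l
  induction l with
  | nil => intro a _ y hy; simp at hy
  | cons b l ih =>
    intro a hch y hy
    cases hch with
    | cons_cons h1 h2 =>
      rcases List.mem_cons.mp hy with rfl | hy'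
      · exact Relation.TransGen.single h1
      · exact Relation.TransGen.head h1 (ih b h2 y hy')

theorem pvChain_nodup (bags : List (String × List (String × Int))) (r : String)
    (hacyc : ∀ x, Relation.ReflTransGen (pvEdge bags) r x → ¬ Relation.TransGen (pvEdge bags) x x) :
    ∀ l (c : String), Relation.ReflTransGen (pvEdge bags) r c →
      List.IsChain (pvEdge bags) (c :: l) → (c :: l).Nodup := by
  intro l
  induction l with
  | nil => intro c _ _; simp
  | cons x l ih =>
    intro c hrc hch
    cases hch with
    | cons_cons h1 h2 =>
      have hnd : (x :: l).Nodup := ih x (hrc.tail h1) h2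
      refine List.nodup_cons.mpr ⟨?_, hnd⟩
      intro hc
      exact hacyc c hrc (pvChain_transGen bags (x :: l) c (List.IsChain.cons_cons h1 h2) c hc)

theorem pvChain_mem_keys (bags : List (String × List (String × Int))) :
    ∀ l (a : String), List.IsChain (pvEdge bags) (a :: l) → ∀ y ∈ l, y ∈ bags.map (fun kv => kv.1) := by
  intro l
  induction l with
  | nil => intro a _ y hy; simp at hy
  | cons b l ih =>
    intro a hch y hy
    cases hch with
    | cons_cons h1 h2 =>
      rcases List.mem_cons.mp hy with rfl | hy'
      · exact pvEdge_mem_keys h1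
      · exact ih b h2 y hy'

theorem pvCard (bags : List (String × List (String × Int))) (s : List String)
    (hnd : s.Nodup) (hsub : ∀ x ∈ s, x ∈ bags.map (fun kv => kv.1)) :
    s.length ≤ bags.length := by
  have h1 : s.toFinset.card = s.length := List.toFinset_card_of_nodup hnd
  have h2 : s.toFinset ⊆ (bags.map (fun kv => kv.1)).toFinset := by
    intro x hx
    rw [List.mem_toFinset] at hx ⊢
    exact hsub x hx
  have h3 := Finset.card_le_card h2
  have h4 := List.toFinset_card_le (bags.map (fun kv => kv.1))
  rw [List.length_map] at h4
  omega

theorem pvBnd_of_acyc (bags : List (String × List (String × Int))) (r : String)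
    (hacyc : ∀ x, Relation.ReflTransGen (pvEdge bags) r x → ¬ Relation.TransGen (pvEdge bags) x x)
    (c : String) (hrc : Relation.ReflTransGen (pvEdge bags) r c) :
    pvBnd bags (bags.length + 1) c := by
  intro l hl
  have hnd : (c :: l).Nodup := pvChain_nodup bags r hacyc l c hrc hl
  have := pvCard bags l hnd.of_cons (pvChain_mem_keys bags l c hl)
  omega

-- === reach completeness: Pre_ really is acyclicity ===
theorem pvGrow_supset (bags : List (String × List (String × Int))) (s : List String) :
    ∀ x ∈ s, x ∈ pvGrow bags s := by
  intro x hx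
  unfold pvGrow
  rw [PySem.Set.mem_update]
  exact Or.inl hx

theorem pvIter_supset (bags : List (String × List (String × Int))) :
    ∀ (n : Nat) (s : List String), ∀ x ∈ s, x ∈ pvIter bags n s := by
  intro n
  induction n with
  | zero => intro s x hx; exact hx
  | succ n ih => intro s x hx; exact ih (pvGrow bags s) x (pvGrow_supset bags s x hx)

theorem pvIter_fixed (bags : List (String × List (String × Int))) :
    ∀ (n : Nat) (s : List String), pvGrow bags s = s → pvIter bags n s = s := by
  intro n
  induction n with
  | zero => intro s _; rfl
  | succ n ih => intro s h; rw [pvIter, h, ih s h]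

theorem pvGrow_closed (bags : List (String × List (String × Int))) (s : List String)
    (h : pvGrow bags s = s) : ∀ x ∈ s, ∀ y ∈ pvSuccs bags x, y ∈ s := by
  intro x hx y hy
  by_contra hys
  have hmemflat : y ∈ s.flatMap (pvSuccs bags) := List.mem_flatMap.mpr ⟨x, hx, hy⟩
  have : y ∈ pvGrow bags s := by
    unfold pvGrow
    rw [PySem.Set.mem_update]
    exact Or.inr hmemflat
  rw [h] at this
  exact hys this

theorem pvGrow_nodup (bags : List (String × List (String × Int))) (s : List String)
    (h : s.Nodup) : (pvGrow bags s).Nodup := PySem.Set.nodup_update _ _ h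

theorem pvGrow_keys (bags : List (String × List (String × Int))) (s : List String)
    (h : ∀ x ∈ s, x ∈ bags.map (fun kv => kv.1)) :
    ∀ x ∈ pvGrow bags s, x ∈ bags.map (fun kv => kv.1) := by
  intro x hx
  unfold pvGrow at hx
  rw [PySem.Set.mem_update] at hx
  rcases hx with hx | hx
  · exact h x hx
  · obtain ⟨z, _, hzx⟩ := List.mem_flatMap.mp hx
    exact pvEdge_mem_keys (hzx : pvEdge bags z x)

theorem pvFix (bags : List (String × List (String × Int))) :
    ∀ (n : Nat) (s : List String), s.Nodup → (∀ x ∈ s, x ∈ bags.map (fun kv => kv.1)) →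
      bags.length < s.length + n → pvGrow bags (pvIter bags n s) = pvIter bags n s := by
  intro n
  induction n with
  | zero =>
    intro s hnd hk hlt
    exact absurd (pvCard bags s hnd hk) (by omega)
  | succ n ih =>
    intro s hnd hk hlt
    by_cases h : pvGrow bags s = s
    · rw [pvIter, h, pvIter_fixed bags n s h]
      exact h
    · rw [pvIter]
      apply ih (pvGrow bags s) (pvGrow_nodup bags s hnd) (pvGrow_keys bags s hk)
      have hext := PySem.Set.update_eq_append_filter s (s.flatMap (pvSuccs bags))
      have hgrow : pvGrow bags s = s ++ List.filter (fun y => !(PySem.Set.contains s y))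
          (PySem.Set.ofList (s.flatMap (pvSuccs bags))) := hext
      have hne : List.filter (fun y => !(PySem.Set.contains s y))
          (PySem.Set.ofList (s.flatMap (pvSuccs bags))) ≠ [] := by
        intro hnil
        exact h (by rw [hgrow, hnil, List.append_nil])
      have hlen : s.length + 1 ≤ (pvGrow bags s).length := by
        rw [hgrow, List.length_append]
        have := List.length_pos_iff.mpr hne
        omega
      omega

theorem pvReach_complete (bags : List (String × List (String × Int))) (x y : String)
    (h : Relation.TransGen (pvEdge bags) x y) : y ∈ pvReach bags x := by
  obtain ⟨z, hxz, hzy⟩ := Relation.TransGen.head'_iff.mp h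
  have hs0k : ∀ w ∈ PySem.Set.ofList (pvSuccs bags x), w ∈ bags.map (fun kv => kv.1) := by
    intro w hw
    rw [PySem.Set.mem_ofList] at hw
    exact pvEdge_mem_keys (hw : pvEdge bags x w)
  have hfix : pvGrow bags (pvReach bags x) = pvReach bags x := by
    unfold pvReach
    exact pvFix bags (bags.length + 1) _ (PySem.Set.nodup_ofList _) hs0k (by omega)
  have hz : z ∈ pvReach bags x := by
    unfold pvReach
    exact pvIter_supset bags _ _ z ((PySem.Set.mem_ofList _ _).mpr (hxz : pvEdge bags x z))
  clear h hxz
  induction hzy with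
  | refl => exact hz
  | tail hab hbc ih =>
    exact pvGrow_closed bags (pvReach bags x) hfix _ ih _ (hbc : pvEdge bags _ _)

theorem pvAcyc_of_pre (bags : List (String × List (String × Int))) (color : String)
    (hpre : Pre_find_container_for bags color) :
    ∀ x, Relation.ReflTransGen (pvEdge bags) color x → ¬ Relation.TransGen (pvEdge bags) x x := by
  intro x hrx htg
  have hx : x ∈ color :: pvReach bags color := by
    rcases (Relation.reflTransGen_iff_eq_or_transGen.mp hrx) with heq | htg'
    · exact heq ▸ List.mem_cons_self
    · exact List.mem_cons_of_mem _ (pvReach_complete bags color x htg')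
  exact hpre x hx (pvReach_complete bags x x htg)

-- ===== VERDICT (by name: the statement is the Claim_ definition above) =====
theorem find_container_for_spec : Claim_equal_find_container_for := by
  intro bags color _ hpre
  unfold Spec_find_container_for find_container_for find_container_for_alt
  have hacyc := pvAcyc_of_pre bags color hpre
  have hb := pvBnd_of_acyc bags color hacyc color Relation.ReflTransGen.refl
  have h := pvMainStack bags color hacyc (bags.length + 1) color PySem.Set.empty []
    (bags.length + 2) (1 + pvCnt bags color (PySem.Set.update PySem.Set.empty (pvFindA bags (bags.length + 1) color)))
    Relation.ReflTransGen.refl hb (by simp [PySem.Set.empty]) (by simp [PySem.Set.empty]) (by simp)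
    (by have := pvCnt_le bags color PySem.Set.empty; omega) le_rfl
  rw [h, pvLoop_nil, show PySem.Set.empty = ([] : List String) from rfl, PySem.Set.update_nil_left]
  exact (PySem.Set.ofList_eq_self_of_nodup _ (pvFindA_nodup bags (bags.length + 1) color)).symm
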